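-- pv_equiv track=rewrite | github.com/neherlab/2024_msc_thesis_otter | benchmark/scripts/format_panaroo_output.py | combine_columns
-- ===== SOURCE A (Python) =====
-- def combine_columns(row,max_count):
--     locus_list = []
--     l = 0
--     dupli="no"
--     sccg="no"
--     singleton="no"
--     for tag in row:
--         if isinstance(tag,str):
--             l+=1
--             if ";" in tag:
--                 for t in tag.split(";"):
--                     locus_list.append(t)
--                 dupli="yes"
--             else:
--                 locus_list.append(tag)
--     if l==1:
--         singleton="yes"
--     if (l==max_count) and (dupli=="no"):
--         sccg="yes"
--
--     return locus_list, len(locus_list), dupli, sccg, singleton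
-- ===== SOURCE B (Python) =====
-- def combine_columns(row, max_count):
--     strings = [t for t in row if isinstance(t, str)]
--     l = len(strings)
--     # one global join + one global split instead of per-tag branching
--     locus_list = ";".join(strings).split(";") if strings else []
--     # a ';' occurred somewhere iff the split produced more pieces than strings
--     dupli = "yes" if len(locus_list) > l else "no"
--     singleton = "yes" if l == 1 else "no"
--     sccg = "yes" if l == max_count and dupli == "no" else "no"
--     return locus_list, len(locus_list), dupli, sccg, singleton
-- ===== Notes on version B (the rewrite author's own statement) =====
-- stated objective: alternative
-- what changed: Replaces A's single loop with per-tag ';'-branching and mutable flags by: filter the strings, build the locus list with ONE global ';'.join followed by ONE split(';'), and derive dupli arithmetically (split produced more pieces than there were strings) instead of scanning for ';' membership.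
import Mathlib
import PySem

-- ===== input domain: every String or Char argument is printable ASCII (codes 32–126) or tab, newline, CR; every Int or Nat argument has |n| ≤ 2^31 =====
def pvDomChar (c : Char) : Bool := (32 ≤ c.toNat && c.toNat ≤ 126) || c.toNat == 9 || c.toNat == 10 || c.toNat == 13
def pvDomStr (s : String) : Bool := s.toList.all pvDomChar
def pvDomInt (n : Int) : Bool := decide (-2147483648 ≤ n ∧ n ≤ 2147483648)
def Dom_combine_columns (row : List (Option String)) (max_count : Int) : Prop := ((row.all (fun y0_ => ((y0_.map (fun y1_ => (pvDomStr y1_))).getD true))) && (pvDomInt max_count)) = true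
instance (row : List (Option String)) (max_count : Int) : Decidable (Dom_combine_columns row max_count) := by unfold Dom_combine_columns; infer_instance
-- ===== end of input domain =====

-- B replaces A's single loop with per-tag ';'-branching and mutable flags by one global
-- ';'.join followed by one split(';'), deriving dupli arithmetically from the piece count.
-- Objective: alternative (same cost, different algorithm).

-- ===== PORT A =====
-- one loop over row, state = (locus_list, l, dupli), exactly A's mutations in order
def combine_columns (row : List (Option String)) (max_count : Int) : List String × Int × String × String × String :=
  let st := row.foldl (fun (st : List String × Int × String) tag =>
      match tag with
      | none => st
      | some t =>
        let l := st.2.1 + 1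
        if PySem.Str.isIn ";" t then
          (((PySem.Str.split? t ";").getD []).foldl (fun ls x => ls ++ [x]) st.1, l, "yes")
        else
          (st.1 ++ [t], l, st.2.2))
    ([], 0, "no")
  let locus_list := st.1
  let l := st.2.1
  let dupli := st.2.2
  let singleton := if l = 1 then "yes" else "no"
  let sccg := if l = max_count ∧ dupli = "no" then "yes" else "no"
  (locus_list, (locus_list.length : Int), dupli, sccg, singleton)

-- ===== PORT B =====
def combine_columns_alt (row : List (Option String)) (max_count : Int) : List String × Int × String × String × String :=
  let strings := row.filterMap id
  let l : Int := strings.length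
  let locus_list := if strings.isEmpty then [] else (PySem.Str.split? (PySem.Str.join ";" strings) ";").getD []
  let dupli := if (locus_list.length : Int) > l then "yes" else "no"
  let singleton := if l = 1 then "yes" else "no"
  let sccg := if l = max_count ∧ dupli = "no" then "yes" else "no"
  (locus_list, (locus_list.length : Int), dupli, sccg, singleton)

-- ===== PRECONDITION & SPEC =====
def Spec_combine_columns (row : List (Option String)) (max_count : Int) (out : List String × Int × String × String × String) : Prop := out = combine_columns_alt row max_count
instance (row : List (Option String)) (max_count : Int) (out : List String × Int × String × String × String) : Decidable (Spec_combine_columns row max_count out) := by unfold Spec_combine_columns; infer_instance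

-- ===== CLAIM =====
def Claim_equal_combine_columns : Prop := ∀ (row : List (Option String)) (max_count : Int), Dom_combine_columns row max_count → Spec_combine_columns row max_count (combine_columns row max_count)

-- ===== LEMMAS AND PROOFS =====

-- per-tag split, used only to characterize A's loop
def pvSplitSemi (t : String) : List String := (PySem.Str.split? t ";").getD [t]

-- structural recursion equivalent to splitting a char list at ';'
def semiSplit : List Char → List (List Char)
  | [] => [[]]
  | c :: rest => if c = ';' then [] :: semiSplit rest else (semiSplit rest).modifyHead (c :: ·)

lemma semiSplit_ne_nil (l : List Char) : semiSplit l ≠ [] := by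
  cases l with
  | nil => simp [semiSplit]
  | cons c rest =>
    simp only [semiSplit]
    split_ifs
    · simp
    · cases h : semiSplit rest with
      | nil => exact (semiSplit_ne_nil rest h).elim
      | cons a t => simp

lemma go_eq_semiSplit (l : List Char) (fuel : Nat) (cur : List Char) (acc : List (List Char))
    (hf : l.length < fuel) :
    PySem.Chars.splitOn.go [';'] fuel l cur acc
      = acc.reverse ++ (semiSplit l).modifyHead (cur.reverse ++ ·) := by
  induction l generalizing fuel cur acc with
  | nil =>
    cases fuel with
    | zero => omega
    | succ f => simp [PySem.Chars.splitOn.go, semiSplit]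
  | cons c rest ih =>
    cases fuel with
    | zero => omega
    | succ f =>
      by_cases hc : c = ';'
      · subst hc
        have hpre : List.isPrefixOf [';'] (';' :: rest) = true := by simp [List.isPrefixOf]
        rw [PySem.Chars.splitOn.go]
        simp only [hpre, if_true, List.length_cons, List.length_nil, List.drop_succ_cons, List.drop_zero]
        rw [ih f [] (cur.reverse :: acc) (by simpa using Nat.lt_of_succ_lt_succ hf)]
        simp [semiSplit]
        cases h : semiSplit rest with
        | nil => exact (semiSplit_ne_nil rest h).elim
        | cons a tl => simp
      · have hpre : List.isPrefixOf [';'] (c :: rest) = false := by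
          simp [List.isPrefixOf]; exact fun hcc => (hc hcc.symm).elim
        rw [PySem.Chars.splitOn.go]
        simp only [hpre, Bool.false_eq_true, if_false]
        rw [ih f (c :: cur) acc (by simpa using Nat.lt_of_succ_lt_succ hf)]
        cases h : semiSplit rest with
        | nil => exact (semiSplit_ne_nil rest h).elim
        | cons a t => simp [semiSplit, hc, h]

lemma splitOn_eq_semiSplit (l : List Char) :
    PySem.Chars.splitOn l [';'] = semiSplit l := by
  unfold PySem.Chars.splitOn
  rw [go_eq_semiSplit l (l.length + 1) [] [] (Nat.lt_succ_self _)]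
  cases h : semiSplit l with
  | nil => exact (semiSplit_ne_nil l h).elim
  | cons a t => simp

lemma split?_eq (t : String) :
    PySem.Str.split? t ";" = some ((semiSplit t.toList).map String.ofList) := by
  simp [PySem.Str.split?, PySem.Chars.split?, show (";".toList) = [';'] from rfl,
    splitOn_eq_semiSplit]

lemma pvSplitSemi_eq (t : String) :
    pvSplitSemi t = (semiSplit t.toList).map String.ofList := by
  simp [pvSplitSemi, split?_eq]

lemma semiSplit_append (a b : List Char) :
    semiSplit (a ++ ';' :: b) = semiSplit a ++ semiSplit b := by
  induction a with
  | nil => simp [semiSplit]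
  | cons c rest ih =>
    by_cases hc : c = ';'
    · subst hc; simp [semiSplit, ih]
    · cases h : semiSplit rest with
      | nil => exact (semiSplit_ne_nil rest h).elim
      | cons x t => simp [semiSplit, hc, ih, h]

lemma semiSplit_join (x : List Char) (xs : List (List Char)) :
    semiSplit (PySem.Chars.join [';'] (x :: xs)) = (x :: xs).flatMap semiSplit := by
  induction xs generalizing x with
  | nil => simp [PySem.Chars.join, List.intercalate]
  | cons y ys ih =>
    have hjoin : PySem.Chars.join [';'] (x :: y :: ys)
        = x ++ ';' :: PySem.Chars.join [';'] (y :: ys) := by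
      simp [PySem.Chars.join, List.intercalate, List.intersperse]
    rw [hjoin, semiSplit_append, ih]
    simp

lemma semiSplit_length (l : List Char) :
    (semiSplit l).length = l.count ';' + 1 := by
  induction l with
  | nil => simp [semiSplit]
  | cons c rest ih =>
    by_cases hc : c = ';'
    · subst hc; simp [semiSplit, ih]
    · simp [semiSplit, hc, ih]

lemma pvSplitSemi_length (t : String) :
    (pvSplitSemi t).length = t.toList.count ';' + 1 := by
  simp [pvSplitSemi_eq, semiSplit_length]

lemma isIn_iff_count (t : String) :
    PySem.Str.isIn ";" t = true ↔ 0 < t.toList.count ';' := by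
  rw [List.count_pos_iff]
  constructor
  · intro h
    by_contra hmem
    have hfalse := (PySem.Chars.isIn_eq_false_iff ";".toList t.toList).mpr
      (fun hin => hmem (by simpa using (List.singleton_infix_iff _ _).mp (by simpa using hin)))
    have : PySem.Str.isIn ";" t = false := by simpa [PySem.Str.isIn] using hfalse
    rw [this] at h
    exact Bool.false_ne_true h
  · intro hmem
    by_contra h
    have h' : PySem.Str.isIn ";" t = false := eq_false_of_ne_true h
    have := (PySem.Chars.isIn_eq_false_iff ";".toList t.toList).mp
      (by simpa [PySem.Str.isIn] using h')
    exact this ((List.singleton_infix_iff _ _).mpr (by simpa using hmem))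

lemma semiSplit_no_semi (l : List Char) (h : ';' ∉ l) : semiSplit l = [l] := by
  induction l with
  | nil => simp [semiSplit]
  | cons c rest ih =>
    have hc : c ≠ ';' := fun hcc => h (hcc ▸ List.mem_cons_self)
    simp [semiSplit, hc, ih (fun hm => h (List.mem_cons_of_mem _ hm))]

lemma split_no_semi (t : String) (h : PySem.Str.isIn ";" t = false) :
    PySem.Str.split? t ";" = some [t] := by
  have hmem : ';' ∉ t.toList := by
    intro hm
    have := (isIn_iff_count t).mpr (List.count_pos_iff.mpr hm)
    rw [h] at this
    exact Bool.false_ne_true this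
  rw [split?_eq, semiSplit_no_semi _ hmem]
  simp

lemma split_some (t : String) : ∃ ps, PySem.Str.split? t ";" = some ps := by
  simp [PySem.Str.split?, PySem.Chars.split?, show (";".toList) = [';'] from rfl]

-- characterization of A's loop
lemma loopA_eq (row : List (Option String)) (ls : List String) (n : Int) (d : String) :
    row.foldl (fun (st : List String × Int × String) tag =>
      match tag with
      | none => st
      | some t =>
        let l := st.2.1 + 1
        if PySem.Str.isIn ";" t then
          (((PySem.Str.split? t ";").getD []).foldl (fun ls x => ls ++ [x]) st.1, l, "yes")
        else
          (st.1 ++ [t], l, st.2.2)) (ls, n, d)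
    = (ls ++ (row.filterMap id).flatMap pvSplitSemi,
       n + ((row.filterMap id).length : Int),
       if (row.filterMap id).any (fun t => PySem.Str.isIn ";" t) then "yes" else d) := by
  induction row generalizing ls n d with
  | nil => simp
  | cons tag rest ih =>
    cases tag with
    | none => simpa using ih ls n d
    | some t =>
      by_cases hsemi : PySem.Str.isIn ";" t = true
      · obtain ⟨ps, hps⟩ := split_some t
        simp only [List.foldl_cons, hsemi, if_true]
        rw [ih]
        have : pvSplitSemi t = ps := by simp [pvSplitSemi, hps]
        simp [hps, this]
        have hc : PySem.Chars.isIn [';'] t.toList = true := by simpa [PySem.Str.isIn] using hsemi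
        refine ⟨by rw [← List.flatMap_def]; exact List.flatMap_singleton' ps, by omega, fun hfalse _ => ?_⟩
        simp_all
      · have hsemi' : PySem.Str.isIn ";" t = false := eq_false_of_ne_true hsemi
        simp only [List.foldl_cons, hsemi', Bool.false_eq_true, if_false]
        rw [ih]
        have : pvSplitSemi t = [t] := by simp [pvSplitSemi, split_no_semi t hsemi']
        have hc : PySem.Chars.isIn [';'] t.toList = false := by simpa [PySem.Str.isIn] using hsemi'
        simp [this]
        refine ⟨by omega, ?_⟩
        simp [hc]

lemma flatMap_len_ge (ts : List String) :
    ts.length ≤ (ts.flatMap pvSplitSemi).length := by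
  induction ts with
  | nil => simp
  | cons t rest ih => simp [pvSplitSemi_length]; omega

lemma dupli_iff (ts : List String) :
    (ts.any (fun t => PySem.Str.isIn ";" t) = true)
      ↔ ts.length < (ts.flatMap pvSplitSemi).length := by
  induction ts with
  | nil => simp
  | cons t rest ih =>
    have hge := flatMap_len_ge rest
    simp only [List.any_cons, List.flatMap_cons, List.length_append, List.length_cons,
      Bool.or_eq_true, pvSplitSemi_length, isIn_iff_count, ih]
    omega

lemma locus_join (x : String) (xs : List String) :
    (PySem.Str.split? (PySem.Str.join ";" (x :: xs)) ";").getD []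
      = (x :: xs).flatMap pvSplitSemi := by
  rw [split?_eq]
  have htl : (PySem.Str.join ";" (x :: xs)).toList
      = PySem.Chars.join [';'] ((x :: xs).map String.toList) := by
    simp [PySem.Str.toList_join]
  simp only [Option.getD_some]
  rw [htl]
  have hmap : (x :: xs).map String.toList = x.toList :: xs.map String.toList := by simp
  rw [hmap, semiSplit_join]
  rw [show x.toList :: xs.map String.toList = (x :: xs).map String.toList from by simp,
    List.flatMap_map]
  rw [List.map_flatMap]
  have hfun : (fun a => (semiSplit (String.toList a)).map String.ofList) = pvSplitSemi :=
    funext fun t => (pvSplitSemi_eq t).symm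
  rw [hfun]

-- ===== VERDICT =====
theorem combine_columns_spec : Claim_equal_combine_columns := by
  intro row max_count _
  unfold Spec_combine_columns combine_columns combine_columns_alt
  rw [loopA_eq]
  simp only [List.nil_append, Int.zero_add]
  cases hs : row.filterMap id with
  | nil => simp
  | cons x xs =>
    have hne : (x :: xs).isEmpty = false := by simp
    have hcond : (((x :: xs).any (fun t => PySem.Str.isIn ";" t)) = true)
        ↔ (((((x :: xs).flatMap pvSplitSemi).length : Int)) > (((x :: xs).length : Int))) := by
      rw [dupli_iff]
      exact (Iff.symm Int.ofNat_lt)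
    have hd : (if ((x :: xs).any (fun t => PySem.Str.isIn ";" t)) then "yes" else "no")
        = (if (((((x :: xs).flatMap pvSplitSemi).length : Int)) > (((x :: xs).length : Int))) then "yes" else "no") :=
      if_congr hcond rfl rfl
    simp only [hne, Bool.false_eq_true, if_false, locus_join, hd]
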